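-- pv_equiv track=rewrite | github.com/posl/comment_recommendation | script/mod_gen/5_time/ja/194_B/7.py | solve
-- ===== SOURCE A (Python) =====
-- def solve(n, a, b):
--     ans = 10**10
--     for i in range(n):
--         for j in range(n):
--             if i == j:
--                 ans = min(ans, a[i] + b[j])
--             else:
--                 ans = min(ans, max(a[i], b[j]))
--     return ans
-- ===== SOURCE B (Python) =====
-- def solve(n, a, b):
--     # O(n): diagonal min directly; off-diagonal pairs via max(a[i], min of b excluding i)
--     # computed from the argmin of b and the min of b excluding that index.
--     INF = 10**10
--     ans = INF
--     for i in range(n):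
--         s = a[i] + b[i]
--         if s < ans:
--             ans = s
--     if n >= 2:
--         j1 = 0
--         for j in range(1, n):
--             if b[j] < b[j1]:
--                 j1 = j
--         m2 = INF
--         for j in range(n):
--             if j != j1 and b[j] < m2:
--                 m2 = b[j]
--         for i in range(n):
--             t = max(a[i], b[j1] if i != j1 else m2)
--             if t < ans:
--                 ans = t
--     return ans
-- ===== Notes on version B (the rewrite author's own statement) =====
-- stated objective: faster
-- what changed: Replaced the O(n^2) scan over all index pairs by an O(n) pass: the diagonal min of a[i]+b[i] directly, and the off-diagonal min via max(a[i], min of b[:n] excluding i), computed from the argmin of b[:n] and the min of b[:n] excluding that argmin.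
import Mathlib
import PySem

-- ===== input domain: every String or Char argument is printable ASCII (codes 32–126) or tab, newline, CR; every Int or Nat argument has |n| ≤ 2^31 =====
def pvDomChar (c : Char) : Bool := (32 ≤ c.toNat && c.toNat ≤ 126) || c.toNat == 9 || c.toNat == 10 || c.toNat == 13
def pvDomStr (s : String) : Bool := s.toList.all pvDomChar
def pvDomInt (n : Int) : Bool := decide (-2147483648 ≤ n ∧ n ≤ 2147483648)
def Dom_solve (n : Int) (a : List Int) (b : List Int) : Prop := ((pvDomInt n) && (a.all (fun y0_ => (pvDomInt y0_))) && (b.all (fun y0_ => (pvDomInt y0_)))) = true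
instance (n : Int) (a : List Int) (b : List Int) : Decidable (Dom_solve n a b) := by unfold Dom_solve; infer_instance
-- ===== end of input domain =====

-- B replaces A's O(n^2) scan over all index pairs by an O(n) pass: the diagonal min
-- directly, and the off-diagonal min via max(a[i], min of b[:n] excluding index i)
-- computed from the argmin of b[:n] and the min of b[:n] excluding that argmin.

-- ===== PORT A =====
def solve (n : Int) (a : List Int) (b : List Int) : Int :=
  (PySem.List.pyRange 0 n 1).foldl (fun ans i =>
    (PySem.List.pyRange 0 n 1).foldl (fun ans j =>
      if i == j then min ans (PySem.List.pyGetD a i 0 + PySem.List.pyGetD b j 0)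
      else min ans (max (PySem.List.pyGetD a i 0) (PySem.List.pyGetD b j 0))) ans)
    (10 ^ 10)

-- ===== PORT B =====
def solve_alt (n : Int) (a : List Int) (b : List Int) : Int :=
  let INF : Int := 10 ^ 10
  let ans := (PySem.List.pyRange 0 n 1).foldl (fun ans i =>
      let s := PySem.List.pyGetD a i 0 + PySem.List.pyGetD b i 0
      if s < ans then s else ans) INF
  if n ≥ 2 then
    let j1 := (PySem.List.pyRange 1 n 1).foldl (fun j1 j =>
      if PySem.List.pyGetD b j 0 < PySem.List.pyGetD b j1 0 then j else j1) 0
    let m2 := (PySem.List.pyRange 0 n 1).foldl (fun m2 j =>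
      if j ≠ j1 ∧ PySem.List.pyGetD b j 0 < m2 then PySem.List.pyGetD b j 0 else m2) INF
    (PySem.List.pyRange 0 n 1).foldl (fun ans i =>
      let t := max (PySem.List.pyGetD a i 0)
        (if i ≠ j1 then PySem.List.pyGetD b j1 0 else m2)
      if t < ans then t else ans) ans
  else ans

-- ===== PRECONDITION & SPEC =====
-- Pre_ excludes exactly the inputs where Python A raises IndexError: n larger than a list's length.
def Pre_solve (n : Int) (a : List Int) (b : List Int) : Prop :=
  n ≤ (a.length : Int) ∧ n ≤ (b.length : Int)
instance (n : Int) (a : List Int) (b : List Int) : Decidable (Pre_solve n a b) := by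
  unfold Pre_solve; infer_instance

def pvWitness_solve : Int × List Int × List Int := (3, [5, -2, 4], [1, 7, 0])

def Spec_solve (n : Int) (a : List Int) (b : List Int) (out : Int) : Prop := out = solve_alt n a b
instance (n : Int) (a : List Int) (b : List Int) (out : Int) : Decidable (Spec_solve n a b out) := by unfold Spec_solve; infer_instance

-- ===== CLAIM (what is proved, stated in full; the proofs are below) =====
def Claim_equal_solve : Prop := ∀ (n : Int) (a : List Int) (b : List Int), Dom_solve n a b → Pre_solve n a b → Spec_solve n a b (solve n a b)

-- ===== LEMMAS AND PROOFS =====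

-- values read by the two programs
def pvAt (xs : List Int) (i : Int) : Int := PySem.List.pyGetD xs i 0
def pvV (a b : List Int) (i j : Int) : Int :=
  if i = j then pvAt a i + pvAt b j else max (pvAt a i) (pvAt b j)

-- generic min-fold facts
lemma foldl_min_le_init (l : List Int) (x : Int) : l.foldl min x ≤ x := by
  induction l generalizing x with
  | nil => simp
  | cons h t ih => exact le_trans (ih _) (min_le_left _ _)

lemma foldl_min_le_mem {l : List Int} {x y : Int} (h : y ∈ l) : l.foldl min x ≤ y := by
  induction l generalizing x with
  | nil => simp at h
  | cons hd t ih =>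
    simp only [List.foldl_cons]
    rcases List.mem_cons.mp h with rfl | hm
    · exact le_trans (foldl_min_le_init _ _) (min_le_right _ _)
    · exact ih hm

lemma le_foldl_min {l : List Int} {x c : Int} (h1 : c ≤ x) (h2 : ∀ y ∈ l, c ≤ y) :
    c ≤ l.foldl min x := by
  induction l generalizing x with
  | nil => simpa using h1
  | cons hd t ih =>
    exact ih (le_min h1 (h2 hd (by simp))) (fun y hy => h2 y (by simp [hy]))

lemma foldl_min_eq_of_dominates {l1 l2 : List Int} {x : Int}
    (h1 : ∀ y ∈ l1, ∃ z ∈ l2, z ≤ y) (h2 : ∀ y ∈ l2, ∃ z ∈ l1, z ≤ y) :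
    l1.foldl min x = l2.foldl min x := by
  apply le_antisymm
  · refine le_foldl_min (foldl_min_le_init _ _) (fun y hy => ?_)
    obtain ⟨z, hz, hle⟩ := h2 y hy
    exact le_trans (foldl_min_le_mem hz) hle
  · refine le_foldl_min (foldl_min_le_init _ _) (fun y hy => ?_)
    obtain ⟨z, hz, hle⟩ := h1 y hy
    exact le_trans (foldl_min_le_mem hz) hle

-- "if f t < acc then f t else acc" is a min-fold
lemma foldl_if_lt_eq_min (l : List Int) (f : Int → Int) (x : Int) :
    l.foldl (fun acc t => if f t < acc then f t else acc) x
      = (l.map f).foldl min x := by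
  induction l generalizing x with
  | nil => rfl
  | cons hd t ih =>
    simp only [List.foldl_cons, List.map_cons]
    rw [ih]
    congr 1
    omega

-- A's nested loops are one min-fold over all pair values
lemma nested_foldl_eq (l L : List Int) (g : Int → Int → Int) (acc : Int) :
    l.foldl (fun ans i => L.foldl (fun ans j => min ans (g i j)) ans) acc
      = (l.flatMap fun i => L.map (g i)).foldl min acc := by
  induction l generalizing acc with
  | nil => rfl
  | cons hd t ih =>
    simp only [List.foldl_cons, List.flatMap_cons, List.foldl_append, ih]
    congr 1
    rw [← List.foldl_map]

-- the argmin loop of B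
lemma argmin_fold (f : Int → Int) (l : List Int) (j0 : Int) :
    (l.foldl (fun j1 j => if f j < f j1 then j else j1) j0 = j0
       ∨ l.foldl (fun j1 j => if f j < f j1 then j else j1) j0 ∈ l)
    ∧ f (l.foldl (fun j1 j => if f j < f j1 then j else j1) j0) ≤ f j0
    ∧ ∀ j ∈ l, f (l.foldl (fun j1 j => if f j < f j1 then j else j1) j0) ≤ f j := by
  induction l generalizing j0 with
  | nil => simp
  | cons hd t ih =>
    simp only [List.foldl_cons]
    obtain ⟨hmem, hle, hall⟩ := ih (if f hd < f j0 then hd else j0)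
    refine ⟨?_, ?_, ?_⟩
    · rcases hmem with h | h
      · rw [h]; split <;> simp_all
      · simp [h]
    · refine le_trans hle ?_
      split <;> omega
    · intro j hj
      rcases List.mem_cons.mp hj with rfl | hm
      · refine le_trans hle ?_
        split <;> omega
      · exact hall j hm

-- the min-excluding-j1 loop of B
lemma minex_fold (f : Int → Int) (j1 : Int) (l : List Int) (x : Int) :
    (l.foldl (fun m j => if j ≠ j1 ∧ f j < m then f j else m) x = x
       ∨ ∃ j ∈ l, j ≠ j1 ∧ l.foldl (fun m j => if j ≠ j1 ∧ f j < m then f j else m) x = f j)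
    ∧ l.foldl (fun m j => if j ≠ j1 ∧ f j < m then f j else m) x ≤ x
    ∧ ∀ j ∈ l, j ≠ j1 → l.foldl (fun m j => if j ≠ j1 ∧ f j < m then f j else m) x ≤ f j := by
  induction l generalizing x with
  | nil => simp
  | cons hd t ih =>
    simp only [List.foldl_cons]
    obtain ⟨hmem, hle, hall⟩ := ih (if hd ≠ j1 ∧ f hd < x then f hd else x)
    refine ⟨?_, ?_, ?_⟩
    · rcases hmem with h | ⟨j, hj, hne, hv⟩
      · by_cases hc : hd ≠ j1 ∧ f hd < x
        · exact Or.inr ⟨hd, by simp, hc.1, by rw [h]; simp [hc]⟩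
        · exact Or.inl (by rw [h]; simp [hc])
      · exact Or.inr ⟨j, by simp [hj], hne, hv⟩
    · refine le_trans hle ?_
      split <;> omega
    · intro j hj hne
      rcases List.mem_cons.mp hj with rfl | hm
      · refine le_trans hle ?_
        split <;> simp_all
      · exact hall j hm hne

lemma pvAt_mem {xs : List Int} {i : Int} (h0 : 0 ≤ i) (h1 : i < (xs.length : Int)) :
    pvAt xs i ∈ xs := by
  unfold pvAt
  apply PySem.List.pyGetD_mem
  unfold PySem.Raise.InRange
  omega

-- the off-diagonal reduction: given an argmin J of b[:n] and the min M of b[:n] without index J,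
-- the min over all pair values equals the min over the diagonal and the per-row values of B
lemma offdiag_key (a b : List Int) (n J M : Int)
    (hJ0 : 0 ≤ J) (hJn : J < n)
    (hJmin : ∀ j, 0 ≤ j → j < n → pvAt b J ≤ pvAt b j)
    (hMex : ∃ j2, 0 ≤ j2 ∧ j2 < n ∧ j2 ≠ J ∧ M = pvAt b j2)
    (hMle : ∀ j, 0 ≤ j → j < n → j ≠ J → M ≤ pvAt b j) :
    ((PySem.List.pyRange 0 n 1).flatMap fun i =>
        (PySem.List.pyRange 0 n 1).map (pvV a b i)).foldl min (10 ^ 10)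
      = ((PySem.List.pyRange 0 n 1).map (fun i => pvAt a i + pvAt b i)
          ++ (PySem.List.pyRange 0 n 1).map
              (fun i => max (pvAt a i) (if i ≠ J then pvAt b J else M))).foldl min (10 ^ 10) := by
  apply foldl_min_eq_of_dominates
  · intro y hy
    obtain ⟨i, hi, hy2⟩ := List.mem_flatMap.mp hy
    obtain ⟨j, hj, rfl⟩ := List.mem_map.mp hy2
    rw [PySem.List.mem_pyRange_one] at hi hj
    by_cases hij : i = j
    · refine ⟨pvAt a i + pvAt b i,
        List.mem_append.mpr (Or.inl (List.mem_map.mpr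
          ⟨i, PySem.List.mem_pyRange_one.mpr (by omega), rfl⟩)), ?_⟩
      subst hij; simp [pvV]
    · refine ⟨max (pvAt a i) (if i ≠ J then pvAt b J else M),
        List.mem_append.mpr (Or.inr (List.mem_map.mpr
          ⟨i, PySem.List.mem_pyRange_one.mpr (by omega), rfl⟩)), ?_⟩
      simp only [pvV, if_neg hij]
      refine max_le_max le_rfl ?_
      by_cases hiJ : i = J
      · rw [if_neg (by simp [hiJ])]
        exact hMle j hj.1 hj.2 (by omega)
      · rw [if_pos hiJ]
        exact hJmin j hj.1 hj.2
  · intro y hy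
    rcases List.mem_append.mp hy with hm | hm
    · obtain ⟨i, hi, rfl⟩ := List.mem_map.mp hm
      rw [PySem.List.mem_pyRange_one] at hi
      refine ⟨pvV a b i i, List.mem_flatMap.mpr
        ⟨i, PySem.List.mem_pyRange_one.mpr hi, List.mem_map.mpr
          ⟨i, PySem.List.mem_pyRange_one.mpr hi, rfl⟩⟩, ?_⟩
      simp [pvV]
    · obtain ⟨i, hi, rfl⟩ := List.mem_map.mp hm
      rw [PySem.List.mem_pyRange_one] at hi
      by_cases hiJ : i = J
      · obtain ⟨j2, hj20, hj2n, hj2J, hM⟩ := hMex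
        refine ⟨pvV a b i j2, List.mem_flatMap.mpr
          ⟨i, PySem.List.mem_pyRange_one.mpr hi, List.mem_map.mpr
            ⟨j2, PySem.List.mem_pyRange_one.mpr (by omega), rfl⟩⟩, ?_⟩
        rw [pvV, if_neg (by omega)]
        rw [if_neg (by simp [hiJ]), hM]
      · refine ⟨pvV a b i J, List.mem_flatMap.mpr
          ⟨i, PySem.List.mem_pyRange_one.mpr hi, List.mem_map.mpr
            ⟨J, PySem.List.mem_pyRange_one.mpr (by omega), rfl⟩⟩, ?_⟩
        rw [pvV, if_neg hiJ, if_pos hiJ]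

-- ===== VERDICT (by name: the statement is the Claim_ definition above) =====
theorem solve_spec : Claim_equal_solve := by
  intro n a b hdom hpre
  unfold Spec_solve
  obtain ⟨hpa, hpb⟩ := hpre
  have hb_bound : ∀ y ∈ b, -2147483648 ≤ y ∧ y ≤ 2147483648 := by
    simp only [Dom_solve, Bool.and_eq_true, List.all_eq_true, pvDomInt,
      decide_eq_true_eq] at hdom
    exact hdom.2
  by_cases hn0 : n ≤ 0
  · simp [solve, solve_alt, PySem.List.pyRange_one_eq_nil hn0, show ¬ n ≥ 2 by omega]
  rw [not_le] at hn0
  by_cases hn2 : n ≥ 2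
  · -- main case: rewrite A into a flat min-fold and B into a min-fold over two mapped lists
    have hA : solve n a b
        = ((PySem.List.pyRange 0 n 1).flatMap fun i =>
            (PySem.List.pyRange 0 n 1).map (pvV a b i)).foldl min (10 ^ 10) := by
      unfold solve
      rw [← nested_foldl_eq]
      congr 1
      funext ans i
      congr 1
      funext acc j
      by_cases h : i = j <;> simp [pvV, pvAt, h]
    rw [hA]
    simp only [solve_alt]
    rw [if_pos hn2]
    rw [foldl_if_lt_eq_min, foldl_if_lt_eq_min, ← List.foldl_append]
    obtain ⟨hJm, hJ0min, hJall⟩ :=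
      argmin_fold (fun j => PySem.List.pyGetD b j 0) (PySem.List.pyRange 1 n 1) 0
    have hJ01 : 0 ≤ (PySem.List.pyRange 1 n 1).foldl
        (fun j1 j => if PySem.List.pyGetD b j 0 < PySem.List.pyGetD b j1 0 then j else j1) 0
        ∧ (PySem.List.pyRange 1 n 1).foldl
        (fun j1 j => if PySem.List.pyGetD b j 0 < PySem.List.pyGetD b j1 0 then j else j1) 0 < n := by
      rcases hJm with h | h
      · rw [h]; omega
      · rw [PySem.List.mem_pyRange_one] at h; omega
    have hJmin : ∀ j, 0 ≤ j → j < n → pvAt b ((PySem.List.pyRange 1 n 1).foldl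
        (fun j1 j => if PySem.List.pyGetD b j 0 < PySem.List.pyGetD b j1 0 then j else j1) 0)
        ≤ pvAt b j := by
      intro j hj0 hjn
      rcases eq_or_lt_of_le hj0 with h | h
      · simpa [pvAt] using h ▸ hJ0min
      · exact hJall j (PySem.List.mem_pyRange_one.mpr ⟨by omega, hjn⟩)
    obtain ⟨hMm, hMle', hMall⟩ :=
      minex_fold (fun j => PySem.List.pyGetD b j 0)
        ((PySem.List.pyRange 1 n 1).foldl
          (fun j1 j => if PySem.List.pyGetD b j 0 < PySem.List.pyGetD b j1 0 then j else j1) 0)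
        (PySem.List.pyRange 0 n 1) (10 ^ 10)
    apply offdiag_key a b n _ _ hJ01.1 hJ01.2 hJmin
    · -- M is realised at some index ≠ J
      rcases hMm with h | ⟨j2, hj2, hne, hv⟩
      · exfalso
        -- some index j0 ≠ J exists, and b's values are < 10^10 on the domain
        set J := (PySem.List.pyRange 1 n 1).foldl
          (fun j1 j => if PySem.List.pyGetD b j 0 < PySem.List.pyGetD b j1 0 then j else j1) 0 with hJdef
        have hj0 : (if J = 0 then (1:Int) else 0) ∈ PySem.List.pyRange 0 n 1 := by
          rw [PySem.List.mem_pyRange_one]; split <;> omega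
        have hj0J : (if J = 0 then (1:Int) else 0) ≠ J := by split <;> omega
        have := hMall _ hj0 hj0J
        rw [h] at this
        have hmem : PySem.List.pyGetD b (if J = 0 then (1:Int) else 0) 0 ∈ b := by
          have : pvAt b (if J = 0 then (1:Int) else 0) ∈ b := by
            apply pvAt_mem (by split <;> omega) (by split <;> omega)
          simpa [pvAt] using this
        have := hb_bound _ hmem
        omega
      · rw [PySem.List.mem_pyRange_one] at hj2
        exact ⟨j2, hj2.1, hj2.2, hne, by simpa [pvAt] using hv⟩
    · intro j hj0 hjn hjJ
      simpa [pvAt] using hMall j (PySem.List.mem_pyRange_one.mpr ⟨hj0, hjn⟩) hjJ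
  · -- n = 1
    have hn1 : n = 1 := by omega
    subst hn1
    have hL : PySem.List.pyRange 0 1 1 = [0] := by
      simpa using PySem.List.pyRange_one_singleton (a := (0:Int))
    simp [solve, solve_alt, hL, show ¬(1:Int) ≥ 2 by omega]
    omega
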